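-- pv_equiv track=rewrite | github.com/SWHL/py_utils | utils.py | generate_equal_segments
-- ===== SOURCE A (Python) =====
-- def generate_equal_segments(total_length, num_segments):
--     """
--     生成均分的索引段
--
--     参数:
--         total_length (int): 总长度/范围
--         num_segments (int): 要分成几段
--
--     返回:
--         list: 包含(start, end)元组的列表，表示每段的索引范围
--     """
--     if num_segments <= 0 or total_length <= 0:
--         return []
--
--     segment_size = total_length // num_segments
--     remainder = total_length % num_segments
--
--     segments = []
--     start = 0
--
--     for i in range(num_segments):
--         # 计算当前段的大小（前面的段可能会多1个元素）
--         current_size = segment_size + (1 if i < remainder else 0)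
--         end = start + current_size
--         segments.append((start, end))
--         start = end
--
--     return segments
-- ===== SOURCE B (Python) =====
-- def generate_equal_segments(total_length, num_segments):
--     if num_segments <= 0 or total_length <= 0:
--         return []
--     segment_size = total_length // num_segments
--     remainder = total_length % num_segments
--     def boundary(i):
--         return i * segment_size + min(i, remainder)
--     return [(boundary(i), boundary(i + 1)) for i in range(num_segments)]
-- ===== Notes on version B (the rewrite author's own statement) =====
-- stated objective: alternative
-- what changed: Replaced the stateful loop carrying a running start accumulator by a stateless closed-form boundary(i) = i*segment_size + min(i, remainder), building each (start, end) pair directly from its index.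
import Mathlib
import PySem

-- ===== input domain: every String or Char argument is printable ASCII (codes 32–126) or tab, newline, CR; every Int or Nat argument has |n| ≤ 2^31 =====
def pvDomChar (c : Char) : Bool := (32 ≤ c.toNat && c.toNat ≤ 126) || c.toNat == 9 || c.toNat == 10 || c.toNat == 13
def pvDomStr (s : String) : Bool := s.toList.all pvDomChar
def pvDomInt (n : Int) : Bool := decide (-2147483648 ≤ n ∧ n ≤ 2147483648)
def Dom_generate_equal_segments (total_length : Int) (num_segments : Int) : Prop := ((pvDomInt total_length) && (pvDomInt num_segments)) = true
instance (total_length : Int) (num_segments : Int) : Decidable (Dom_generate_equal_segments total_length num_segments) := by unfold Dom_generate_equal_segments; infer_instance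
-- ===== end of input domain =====

-- B replaces A's running-start accumulator by a closed-form per-index boundary; same cost (alternative decomposition).

-- ===== PORT A =====
def generate_equal_segments (total_length : Int) (num_segments : Int) : List (Int × Int) :=
  if num_segments ≤ 0 ∨ total_length ≤ 0 then []
  else
    let segment_size := PySem.Int.floordiv total_length num_segments
    let remainder := PySem.Int.mod total_length num_segments
    -- segments.append(...) in a loop: accumulated in reverse and reversed at the end (same order, linear)
    (((PySem.List.pyRange 0 num_segments 1).foldl
      (fun (st : List (Int × Int) × Int) i =>
        let current_size := segment_size + (if i < remainder then 1 else 0)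
        let e := st.2 + current_size
        ((st.2, e) :: st.1, e))
      ([], 0)).1).reverse

-- ===== PORT B =====
def pvBoundary (segment_size remainder i : Int) : Int := i * segment_size + min i remainder

def generate_equal_segments_alt (total_length : Int) (num_segments : Int) : List (Int × Int) :=
  if num_segments ≤ 0 ∨ total_length ≤ 0 then []
  else
    let segment_size := PySem.Int.floordiv total_length num_segments
    let remainder := PySem.Int.mod total_length num_segments
    (PySem.List.pyRange 0 num_segments 1).map
      (fun i => (pvBoundary segment_size remainder i, pvBoundary segment_size remainder (i + 1)))

-- ===== PRECONDITION & SPEC =====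
def Spec_generate_equal_segments (total_length : Int) (num_segments : Int) (out : List (Int × Int)) : Prop := out = generate_equal_segments_alt total_length num_segments
instance (total_length : Int) (num_segments : Int) (out : List (Int × Int)) : Decidable (Spec_generate_equal_segments total_length num_segments out) := by unfold Spec_generate_equal_segments; infer_instance

-- ===== CLAIM (what is proved, stated in full; the proofs are below) =====
def Claim_equal_generate_equal_segments : Prop := ∀ (total_length : Int) (num_segments : Int), Dom_generate_equal_segments total_length num_segments → Spec_generate_equal_segments total_length num_segments (generate_equal_segments total_length num_segments)

-- ===== LEMMAS AND PROOFS =====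

-- invariant: folding A's loop body over range(0, n) yields B's per-index pairs, with start = boundary n
theorem pv_fold_eq (q r : Int) (hr : 0 ≤ r) (n : Nat) :
    (PySem.List.pyRange 0 n 1).foldl
      (fun (st : List (Int × Int) × Int) i =>
        ((st.2, st.2 + (q + if i < r then 1 else 0)) :: st.1,
         st.2 + (q + if i < r then 1 else 0)))
      ([], 0)
    = (((PySem.List.pyRange 0 n 1).map
        (fun i => (pvBoundary q r i, pvBoundary q r (i + 1)))).reverse,
       pvBoundary q r n) := by
  induction n with
  | zero =>
    have : pvBoundary q r 0 = 0 := by simp only [pvBoundary]; omega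
    simp [PySem.List.pyRange_one_eq_nil le_rfl, this]
  | succ k ih =>
    have h : ((0 : Int) ≤ (k : Int)) := Int.natCast_nonneg k
    have hm : ((k : Int) + 1) * q = (k : Int) * q + q := by ring
    have hb : pvBoundary q r ((k : Int) + 1)
        = pvBoundary q r (k : Int) + (q + (if (k : Int) < r then 1 else 0)) := by
      simp only [pvBoundary]
      rcases lt_or_ge (k : Int) r with hk | hk
      · rw [if_pos hk]; omega
      · rw [if_neg (not_lt.mpr hk)]; omega
    rw [show ((k + 1 : Nat) : Int) = (k : Int) + 1 by push_cast; ring,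
        PySem.List.pyRange_one_succ_right h, List.foldl_append, List.map_append, ih]
    simp only [List.foldl_cons, List.foldl_nil, List.map_cons, List.map_nil,
      List.reverse_append, List.reverse_cons, List.reverse_nil, List.nil_append,
      List.cons_append]
    rw [hb]

-- ===== VERDICT (by name: the statement is the Claim_ definition above) =====
theorem generate_equal_segments_spec : Claim_equal_generate_equal_segments := by
  intro tl n _
  unfold Spec_generate_equal_segments generate_equal_segments generate_equal_segments_alt
  by_cases h : n ≤ 0 ∨ tl ≤ 0
  · simp [h]
  · simp only [if_neg h]
    push Not at h
    have hr : 0 ≤ PySem.Int.mod tl n := PySem.Int.mod_nonneg tl h.1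
    have hn : n = ((n.toNat : Nat) : Int) := by omega
    rw [hn] at hr
    rw [hn, pv_fold_eq _ _ hr, List.reverse_reverse]
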